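-- pv_equiv track=rewrite | github.com/burgrp/easun-smp-telemetry | fw/app/crc_half.py | crc_half
-- ===== SOURCE A (Python) =====
-- def crc_half(data):
--
--     crc_ta = (0x0000, 0x1021, 0x2042, 0x3063, 0x4084, 0x50a5, 0x60c6, 0x70e7, 0x8108, 0x9129, 0xa14a, 0xb16b, 0xc18c, 0xd1ad, 0xe1ce, 0xf1ef)
--
--     crc = 0
--     for byte in data:
--         da = crc >> 12 & 0x0F
--         crc <<= 4
--         crc ^= crc_ta[da ^ (byte >> 4)]
--
--         da = crc >> 12 & 0x0F
--         crc <<= 4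
--         crc ^= crc_ta[da ^ (byte & 0x0f)]
--
--     crcLow = crc & 0xFF
--     crcHigh = (crc >> 8) & 0xFF
--
--     if crcLow == 0x28 or crcLow == 0x0d or crcLow == 0x0a:
--         crcLow+=1
--
--     if crcHigh == 0x28 or crcHigh == 0x0d or crcHigh == 0x0a:
--         crcHigh+=1
--
--     crc = (crcHigh << 8) | crcLow
--
--     return (crcHigh, crcLow)
-- ===== SOURCE B (Python) =====
-- def crc_half(data):
--     crc = 0
--     for byte in data:
--         for i in range(8):
--             bit = ((crc >> 15) & 1) ^ ((byte >> (7 - i)) & 1)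
--             crc = (((crc << 1) ^ 0x1021) & 0xFFFF) if bit else ((crc << 1) & 0xFFFF)
--     crcLow = crc & 0xFF
--     crcHigh = (crc >> 8) & 0xFF
--     if crcLow in (0x28, 0x0d, 0x0a):
--         crcLow += 1
--     if crcHigh in (0x28, 0x0d, 0x0a):
--         crcHigh += 1
--     return (crcHigh, crcLow)
-- ===== Notes on version B (the rewrite author's own statement) =====
-- stated objective: simpler
-- what changed: B drops A's 16-entry half-byte lookup table and computes the CRC-16/XMODEM bit-serially: for each byte it feeds its 8 bits MSB-first into the shift register (crc = ((crc<<1) ^ 0x1021) & 0xFFFF when the top bit xor data bit is set, else (crc<<1) & 0xFFFF), then applies the same 0x28/0x0d/0x0a byte adjustments.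
import Mathlib
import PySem

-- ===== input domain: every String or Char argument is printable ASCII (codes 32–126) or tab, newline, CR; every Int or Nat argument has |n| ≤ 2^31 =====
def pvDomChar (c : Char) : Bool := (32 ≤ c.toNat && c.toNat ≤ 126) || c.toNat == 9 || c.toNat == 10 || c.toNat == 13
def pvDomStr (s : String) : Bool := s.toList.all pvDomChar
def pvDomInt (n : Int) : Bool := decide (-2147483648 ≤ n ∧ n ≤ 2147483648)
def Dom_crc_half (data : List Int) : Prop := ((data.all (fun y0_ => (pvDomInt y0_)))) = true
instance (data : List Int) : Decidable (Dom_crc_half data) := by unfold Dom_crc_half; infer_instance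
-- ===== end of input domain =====

-- B replaces A's 16-entry half-byte lookup table by the direct bit-serial CRC-16/XMODEM
-- computation (8 MSB-first bit steps per byte, masked to 16 bits); same return value.

-- ===== PORT A =====
def crcTa : List Int :=
  [0, 4129, 8258, 12387, 16516, 20645, 24774, 28903,
   33032, 37161, 41290, 45419, 49548, 53677, 57806, 61935]

def crcHalfLoopA : List Int → Int → Option Int
  | [], crc => some crc
  | byte :: rest, crc =>
    let da := PySem.Int.band (crc >>> (12 : Nat)) 15
    match PySem.List.pyGet? crcTa (PySem.Int.bxor da (byte >>> (4 : Nat))) with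
    | none => none
    | some t =>
      let crc1 := PySem.Int.bxor (crc <<< (4 : Nat)) t
      let da2 := PySem.Int.band (crc1 >>> (12 : Nat)) 15
      match PySem.List.pyGet? crcTa (PySem.Int.bxor da2 (PySem.Int.band byte 15)) with
      | none => none
      | some t2 => crcHalfLoopA rest (PySem.Int.bxor (crc1 <<< (4 : Nat)) t2)

def crc_half (data : List Int) : Int × Int :=
  match crcHalfLoopA data 0 with
  | none => (0, 0)  -- unreachable under Pre_crc_half (Python raises IndexError there)
  | some crc =>
    let crcLow := PySem.Int.band crc 255
    let crcHigh := PySem.Int.band (crc >>> (8 : Nat)) 255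
    let crcLow := if crcLow = 40 ∨ crcLow = 13 ∨ crcLow = 10 then crcLow + 1 else crcLow
    let crcHigh := if crcHigh = 40 ∨ crcHigh = 13 ∨ crcHigh = 10 then crcHigh + 1 else crcHigh
    (crcHigh, crcLow)

-- ===== PORT B =====
def crcBitB (byte c : Int) (i : Nat) : Int :=
  let bit := PySem.Int.bxor (PySem.Int.band (c >>> (15 : Nat)) 1)
                            (PySem.Int.band (byte >>> (7 - i)) 1)
  if bit ≠ 0 then PySem.Int.band (PySem.Int.bxor (c <<< (1 : Nat)) 4129) 65535
  else PySem.Int.band (c <<< (1 : Nat)) 65535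

def crcByteB (crc byte : Int) : Int :=
  (List.range 8).foldl (crcBitB byte) crc

def crcHalfLoopB : List Int → Int → Int
  | [], crc => crc
  | byte :: rest, crc => crcHalfLoopB rest (crcByteB crc byte)

def crc_half_alt (data : List Int) : Int × Int :=
  let crc := crcHalfLoopB data 0
  let crcLow := PySem.Int.band crc 255
  let crcHigh := PySem.Int.band (crc >>> (8 : Nat)) 255
  let crcLow := if crcLow = 40 ∨ crcLow = 13 ∨ crcLow = 10 then crcLow + 1 else crcLow
  let crcHigh := if crcHigh = 40 ∨ crcHigh = 13 ∨ crcHigh = 10 then crcHigh + 1 else crcHigh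
  (crcHigh, crcLow)

-- ===== PRECONDITION & SPEC =====
-- Pre_ is exactly the set of inputs on which Python A returns: on any byte below -256 or
-- above 255 A's table lookup crc_ta[...] raises IndexError.
def Pre_crc_half (data : List Int) : Prop := ∀ b ∈ data, -256 ≤ b ∧ b ≤ 255
instance (data : List Int) : Decidable (Pre_crc_half data) := by unfold Pre_crc_half; infer_instance

def pvWitness_crc_half : List Int := [0, 255, -256, 13, -1]

def Spec_crc_half (data : List Int) (out : Int × Int) : Prop := out = crc_half_alt data
instance (data : List Int) (out : Int × Int) : Decidable (Spec_crc_half data out) := by unfold Spec_crc_half; infer_instance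

-- ===== CLAIM (what is proved, stated in full; the proofs are below) =====
def Claim_equal_crc_half : Prop := ∀ (data : List Int), Dom_crc_half data → Pre_crc_half data → Spec_crc_half data (crc_half data)

-- ===== LEMMAS AND PROOFS =====

-- Nat-level shadows: B's bit step, one nibble (4 MSB-first bit steps), A's table row,
-- and the per-byte state trace shared by both proofs.
def taN (i : Nat) : Nat :=
  [0, 4129, 8258, 12387, 16516, 20645, 24774, 28903,
   33032, 37161, 41290, 45419, 49548, 53677, 57806, 61935].getD i 0

def bstepN (c b : Nat) : Nat :=
  if ((c >>> 15) &&& 1) ^^^ b ≠ 0 then ((c <<< 1) ^^^ 4129) &&& 65535 else (c <<< 1) &&& 65535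

def nibN (c n : Nat) : Nat :=
  bstepN (bstepN (bstepN (bstepN c ((n >>> 3) &&& 1)) ((n >>> 2) &&& 1)) ((n >>> 1) &&& 1)) (n &&& 1)

def hiN (byte : Int) : Nat := (PySem.Int.band byte 255).toNat >>> 4
def loN (byte : Int) : Nat := (PySem.Int.band byte 255).toNat &&& 15

def gLoop : List Int → Nat → Nat
  | [], c => c
  | byte :: rest, c => gLoop rest (nibN (nibN c (hiN byte)) (loN byte))

theorem tableH : ∀ h, h < 16 → ∀ n, n < 16 → nibN (h <<< 12) n = taN (h ^^^ n) := by decide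

theorem lookupA : ∀ (da s : Int), 0 ≤ da → da ≤ 15 → -16 ≤ s → s ≤ 15 →
    PySem.List.pyGet? crcTa (PySem.Int.bxor da s) =
      some ((taN ((PySem.Int.bxor da (PySem.Int.band s 15)).toNat) : Nat) : Int) := by
  intro da s h1 h2 h3 h4
  interval_cases da <;> interval_cases s <;> decide

theorem byteFacts : ∀ (byte : Int), -256 ≤ byte → byte ≤ 255 →
    (0 ≤ PySem.Int.band byte 255 ∧ PySem.Int.band byte 255 ≤ 255) ∧
    (-16 ≤ byte >>> (4 : Nat) ∧ byte >>> (4 : Nat) ≤ 15) ∧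
    PySem.Int.band (byte >>> (4 : Nat)) 15 = ((hiN byte : Nat) : Int) ∧
    PySem.Int.band byte 15 = ((loN byte : Nat) : Int) ∧
    (∀ k : Nat, k ≤ 7 → PySem.Int.band (byte >>> k) 1 =
      ((((PySem.Int.band byte 255).toNat >>> k) &&& 1 : Nat) : Int)) := by
  intro byte h1 h2
  interval_cases byte <;> decide

theorem bstep_xor (c d b e : Nat) (hb : b ≤ 1) (he : e ≤ 1) :
    bstepN (c ^^^ d) (b ^^^ e) = bstepN c b ^^^ bstepN d e := by
  have htc : (c >>> 15) &&& 1 ≤ 1 := Nat.and_le_right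
  have htd : (d >>> 15) &&& 1 ≤ 1 := Nat.and_le_right
  unfold bstepN
  rw [show ((c ^^^ d) >>> 15) &&& 1 = ((c >>> 15) &&& 1) ^^^ ((d >>> 15) &&& 1) by
    simp only [Nat.shiftRight_xor_distrib, Nat.and_xor_distrib_right]]
  generalize (c >>> 15) &&& 1 = tc at htc
  generalize (d >>> 15) &&& 1 = td at htd
  interval_cases tc <;> interval_cases td <;> interval_cases b <;> interval_cases e <;>
    norm_num <;>
    simp [Nat.shiftLeft_xor_distrib, ← Nat.and_xor_distrib_right, Nat.xor_assoc,
      Nat.xor_comm, Nat.xor_left_comm]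

theorem nib_xor (c d n1 n2 : Nat) :
    nibN (c ^^^ d) (n1 ^^^ n2) = nibN c n1 ^^^ nibN d n2 := by
  unfold nibN
  have e3 : ((n1 ^^^ n2) >>> 3) &&& 1 = ((n1 >>> 3) &&& 1) ^^^ ((n2 >>> 3) &&& 1) := by
    simp only [Nat.shiftRight_xor_distrib, Nat.and_xor_distrib_right]
  have e2 : ((n1 ^^^ n2) >>> 2) &&& 1 = ((n1 >>> 2) &&& 1) ^^^ ((n2 >>> 2) &&& 1) := by
    simp only [Nat.shiftRight_xor_distrib, Nat.and_xor_distrib_right]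
  have e1 : ((n1 ^^^ n2) >>> 1) &&& 1 = ((n1 >>> 1) &&& 1) ^^^ ((n2 >>> 1) &&& 1) := by
    simp only [Nat.shiftRight_xor_distrib, Nat.and_xor_distrib_right]
  have e0 : (n1 ^^^ n2) &&& 1 = (n1 &&& 1) ^^^ (n2 &&& 1) := by
    simp only [Nat.and_xor_distrib_right]
  rw [e3, e2, e1, e0,
    bstep_xor _ _ _ _ Nat.and_le_right Nat.and_le_right,
    bstep_xor _ _ _ _ Nat.and_le_right Nat.and_le_right,
    bstep_xor _ _ _ _ Nat.and_le_right Nat.and_le_right,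
    bstep_xor _ _ _ _ Nat.and_le_right Nat.and_le_right]

theorem shl_val (c k : Nat) : c <<< k = c * 2 ^ k := Nat.shiftLeft_eq c k

theorem bstep_zero (c : Nat) (h : c < 32768) : bstepN c 0 = c <<< 1 := by
  unfold bstepN
  have h15 : c >>> 15 = 0 := by
    rw [Nat.shiftRight_eq_div_pow]; omega
  rw [h15]
  norm_num
  rw [Nat.and_two_pow_sub_one_eq_mod (c <<< 1) 16]
  rw [Nat.shiftLeft_eq]
  apply Nat.mod_eq_of_lt
  norm_num; omega

theorem nib_low (r : Nat) (h : r < 4096) : nibN r 0 = r <<< 4 := by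
  unfold nibN
  norm_num
  rw [bstep_zero r (by omega), shl_val r]
  rw [bstep_zero (r * 2 ^ 1) (by omega), shl_val]
  rw [bstep_zero (r * 2 ^ 1 * 2 ^ 1) (by omega), shl_val]
  rw [bstep_zero (r * 2 ^ 1 * 2 ^ 1 * 2 ^ 1) (by omega), shl_val]
  rw [shl_val]; ring

theorem decomp (c : Nat) (h : c < 65536) : (c &&& 4095) ^^^ ((c >>> 12) <<< 12) = c := by
  apply Nat.eq_of_testBit_eq
  intro j
  have h4095 : (4095 : Nat) = 2 ^ 12 - 1 := by norm_num
  simp only [Nat.testBit_xor, Nat.testBit_and, Nat.testBit_shiftLeft, Nat.testBit_shiftRight,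
    h4095, Nat.testBit_two_pow_sub_one]
  by_cases hj : j < 12
  · simp [hj, Nat.not_le.mpr hj]
  · by_cases hj16 : j < 16
    · have hjj : 12 + (j - 12) = j := by omega
      simp [hj, Nat.le_of_not_lt hj, hjj]
    · have hc : c.testBit j = false := Nat.testBit_eq_false_of_lt
        (lt_of_lt_of_le h (by
          have := Nat.pow_le_pow_right (show 1 ≤ 2 by norm_num) (Nat.le_of_not_lt hj16); omega))
      have hjj : 12 + (j - 12) = j := by omega
      simp [hj, hjj, hc]

theorem taN_le (i : Nat) : taN i ≤ 65535 := by
  by_cases h : i < 16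
  · interval_cases i <;> decide
  · unfold taN
    rw [List.getD_eq_default]
    · exact Nat.zero_le _
    · simpa using Nat.le_of_not_lt h

theorem mask_val (x : Nat) : x &&& 65535 = x % 65536 := Nat.and_two_pow_sub_one_eq_mod x 16

theorem shl4_mask (c : Nat) (h : c < 65536) : (c <<< 4) &&& 65535 = (c &&& 4095) <<< 4 := by
  conv_lhs => rw [← decomp c h]
  rw [Nat.shiftLeft_xor_distrib, ← Nat.shiftLeft_add, Nat.and_xor_distrib_right]
  have h1 : ((c &&& 4095) <<< 4) &&& 65535 = (c &&& 4095) <<< 4 := by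
    rw [mask_val, Nat.mod_eq_of_lt]
    rw [shl_val]
    have : c &&& 4095 ≤ 4095 := Nat.and_le_right
    omega
  have h2 : ((c >>> 12) <<< 16) &&& 65535 = 0 := by
    rw [mask_val, shl_val]
    norm_num [Nat.mul_mod_left]
  rw [h1, h2, Nat.xor_zero]

theorem taN_mask (i : Nat) : taN i &&& 65535 = taN i := by
  rw [mask_val, Nat.mod_eq_of_lt]
  have := taN_le i; omega

theorem nib_char (c n : Nat) (hc : c < 65536) (hn : n < 16) :
    nibN c n = ((c <<< 4) ^^^ taN ((c >>> 12) ^^^ n)) &&& 65535 := by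
  have hr : c &&& 4095 < 4096 := lt_of_le_of_lt Nat.and_le_right (by norm_num)
  have hh : c >>> 12 < 16 := by rw [Nat.shiftRight_eq_div_pow]; omega
  calc nibN c n = nibN ((c &&& 4095) ^^^ ((c >>> 12) <<< 12)) (0 ^^^ n) := by
        rw [decomp c hc, Nat.zero_xor]
    _ = nibN (c &&& 4095) 0 ^^^ nibN ((c >>> 12) <<< 12) n := nib_xor _ _ _ _
    _ = ((c &&& 4095) <<< 4) ^^^ taN ((c >>> 12) ^^^ n) := by
        rw [nib_low _ hr, tableH _ hh _ hn]
    _ = ((c <<< 4) ^^^ taN ((c >>> 12) ^^^ n)) &&& 65535 := by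
        rw [Nat.and_xor_distrib_right, shl4_mask c hc, taN_mask]

theorem aMask (c n : Nat) (hn : n < 16) :
    ((c <<< 4) ^^^ taN (((c >>> 12) &&& 15) ^^^ n)) &&& 65535 = nibN (c &&& 65535) n := by
  have hc' : c &&& 65535 < 65536 := lt_of_le_of_lt Nat.and_le_right (by norm_num)
  have hidx : (c &&& 65535) >>> 12 = (c >>> 12) &&& 15 := by
    rw [Nat.shiftRight_and_distrib, show (65535 : Nat) >>> 12 = 15 from rfl]
  have hshl : (c <<< 4) &&& 65535 = ((c &&& 65535) <<< 4) &&& 65535 := by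
    rw [mask_val, mask_val, mask_val, shl_val, shl_val]
    omega
  rw [nib_char _ _ hc' hn, hidx, Nat.and_xor_distrib_right, taN_mask, hshl]
  conv_rhs => rw [Nat.and_xor_distrib_right, taN_mask]

theorem hiN_lt (byte : Int) (h1 : -256 ≤ byte) (h2 : byte ≤ 255) : hiN byte < 16 := by
  have hb := (byteFacts byte h1 h2).1
  unfold hiN
  rw [Nat.shiftRight_eq_div_pow]
  omega

theorem loN_lt (byte : Int) : loN byte < 16 :=
  lt_of_le_of_lt Nat.and_le_right (by norm_num)

def aStepN (c n : Nat) : Nat := (c <<< 4) ^^^ taN (((c >>> 12) &&& 15) ^^^ n)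

theorem aMask' (c n : Nat) (hn : n < 16) :
    aStepN c n &&& 65535 = nibN (c &&& 65535) n := aMask c n hn

theorem band15_cast (x : Nat) :
    PySem.Int.band ((x : Int) >>> (12 : Nat)) 15 = (((x >>> 12) &&& 15 : Nat) : Int) := by
  rw [← Int.natCast_shiftRight, show (15:Int) = ((15:Nat):Int) from rfl, PySem.Int.band_natCast]

theorem aStep (cN : Nat) (byte : Int) (h1 : -256 ≤ byte) (h2 : byte ≤ 255) (rest : List Int) :
    crcHalfLoopA (byte :: rest) (cN : Int) =
      crcHalfLoopA rest ((aStepN (aStepN cN (hiN byte)) (loN byte) : Nat) : Int) := by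
  obtain ⟨⟨hm0, hm255⟩, ⟨hs1, hs2⟩, hhi, hlo, _⟩ := byteFacts byte h1 h2
  show (match PySem.List.pyGet? crcTa (PySem.Int.bxor (PySem.Int.band ((cN:Int) >>> (12:Nat)) 15) (byte >>> (4:Nat))) with
    | none => none
    | some t =>
      let crc1 := PySem.Int.bxor ((cN:Int) <<< (4 : Nat)) t
      let da2 := PySem.Int.band (crc1 >>> (12 : Nat)) 15
      match PySem.List.pyGet? crcTa (PySem.Int.bxor da2 (PySem.Int.band byte 15)) with
      | none => none
      | some t2 => crcHalfLoopA rest (PySem.Int.bxor (crc1 <<< (4 : Nat)) t2)) = _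
  rw [band15_cast cN, lookupA _ _ (by positivity) (by exact_mod_cast Nat.and_le_right) hs1 hs2,
    hhi, PySem.Int.bxor_natCast]
  simp only [Int.toNat_natCast]
  have hcast1 : PySem.Int.bxor ((cN:Int) <<< (4:Nat)) ((taN (((cN >>> 12) &&& 15) ^^^ hiN byte) : Nat) : Int)
      = ((aStepN cN (hiN byte) : Nat) : Int) := by
    rw [← Int.natCast_shiftLeft, PySem.Int.bxor_natCast]; rfl
  rw [hcast1, band15_cast, lookupA _ _ (by positivity) (by exact_mod_cast Nat.and_le_right)
      (by rw [hlo]; exact Int.le_trans (by norm_num) (Int.natCast_nonneg _)) (by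
        have hl : loN byte < 16 := lt_of_le_of_lt Nat.and_le_right (by norm_num)
        rw [hlo]; exact_mod_cast (by omega : loN byte ≤ 15)),
    hlo]
  have hl15 : PySem.Int.band ((loN byte : Nat) : Int) 15 = ((loN byte : Nat) : Int) := by
    rw [show (15:Int) = ((15:Nat):Int) from rfl, PySem.Int.band_natCast]
    norm_cast
    unfold loN
    rw [Nat.and_assoc]
    norm_num
  rw [hl15, PySem.Int.bxor_natCast]
  simp only [Int.toNat_natCast]
  show crcHalfLoopA rest (PySem.Int.bxor (((aStepN cN (hiN byte) : Nat) : Int) <<< (4:Nat))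
    ((taN (((aStepN cN (hiN byte) >>> 12) &&& 15) ^^^ loN byte) : Nat) : Int)) = _
  rw [← Int.natCast_shiftLeft, PySem.Int.bxor_natCast]
  rfl

theorem loopA (data : List Int) : (∀ b ∈ data, -256 ≤ b ∧ b ≤ 255) →
    ∀ cN : Nat, ∃ rN : Nat, crcHalfLoopA data (cN : Int) = some ((rN : Nat) : Int) ∧
      rN &&& 65535 = gLoop data (cN &&& 65535) := by
  induction data with
  | nil => exact fun _ cN => ⟨cN, rfl, rfl⟩
  | cons byte rest ih =>
    intro hpre cN
    have hb := hpre byte List.mem_cons_self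
    have hrest : ∀ x ∈ rest, -256 ≤ x ∧ x ≤ 255 :=
      fun x hx => hpre x (List.mem_cons_of_mem _ hx)
    obtain ⟨rN, hA, hm⟩ := ih hrest (aStepN (aStepN cN (hiN byte)) (loN byte))
    refine ⟨rN, ?_, ?_⟩
    · rw [aStep cN byte hb.1 hb.2 rest]; exact hA
    · rw [hm]
      show gLoop rest _ = gLoop rest _
      congr 1
      rw [aMask' _ _ (loN_lt byte), aMask' _ _ (hiN_lt byte hb.1 hb.2)]

theorem bstep_cast (x b : Nat) :
    (if PySem.Int.bxor (PySem.Int.band ((x:Int) >>> (15 : Nat)) 1) (b : Int) ≠ 0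
     then PySem.Int.band (PySem.Int.bxor ((x:Int) <<< (1 : Nat)) 4129) 65535
     else PySem.Int.band ((x:Int) <<< (1 : Nat)) 65535)
    = ((bstepN x b : Nat) : Int) := by
  rw [← Int.natCast_shiftRight, ← Int.natCast_shiftLeft]
  rw [show (1:Int) = ((1:Nat):Int) from rfl, show (4129:Int) = ((4129:Nat):Int) from rfl,
    show (65535:Int) = ((65535:Nat):Int) from rfl]
  simp only [PySem.Int.band_natCast, PySem.Int.bxor_natCast]
  unfold bstepN
  by_cases hb : ((x >>> 15) &&& 1) ^^^ b = 0 <;> simp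

theorem nib2 (x : Nat) (m : Nat) :
    nibN (nibN x (m >>> 4)) (m &&& 15) =
      bstepN (bstepN (bstepN (bstepN (bstepN (bstepN (bstepN (bstepN x
        ((m >>> 7) &&& 1)) ((m >>> 6) &&& 1)) ((m >>> 5) &&& 1)) ((m >>> 4) &&& 1))
        ((m >>> 3) &&& 1)) ((m >>> 2) &&& 1)) ((m >>> 1) &&& 1)) (m &&& 1) := by
  have s3 : (m >>> 4) >>> 3 = m >>> 7 := by rw [← Nat.shiftRight_add]
  have s2 : (m >>> 4) >>> 2 = m >>> 6 := by rw [← Nat.shiftRight_add]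
  have s1 : (m >>> 4) >>> 1 = m >>> 5 := by rw [← Nat.shiftRight_add]
  have l3 : ((m &&& 15) >>> 3) &&& 1 = (m >>> 3) &&& 1 := by
    rw [Nat.shiftRight_and_distrib, Nat.and_assoc, show ((15:Nat) >>> 3) &&& 1 = 1 by decide]
  have l2 : ((m &&& 15) >>> 2) &&& 1 = (m >>> 2) &&& 1 := by
    rw [Nat.shiftRight_and_distrib, Nat.and_assoc, show ((15:Nat) >>> 2) &&& 1 = 1 by decide]
  have l1 : ((m &&& 15) >>> 1) &&& 1 = (m >>> 1) &&& 1 := by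
    rw [Nat.shiftRight_and_distrib, Nat.and_assoc, show ((15:Nat) >>> 1) &&& 1 = 1 by decide]
  have l0 : (m &&& 15) &&& 1 = m &&& 1 := by
    rw [Nat.and_assoc, show (15:Nat) &&& 1 = 1 by decide]
  unfold nibN
  rw [s3, s2, s1, l3, l2, l1, l0]

theorem stepB (byte : Int) (h1 : -256 ≤ byte) (h2 : byte ≤ 255) (x : Nat) (i : Nat) (hi : i ≤ 7) :
    crcBitB byte (x : Int) i
      = ((bstepN x (((PySem.Int.band byte 255).toNat >>> (7 - i)) &&& 1) : Nat) : Int) := by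
  obtain ⟨_, _, _, _, hbit⟩ := byteFacts byte h1 h2
  unfold crcBitB
  rw [hbit (7 - i) (by omega), bstep_cast]

theorem byteB (x : Nat) (byte : Int) (h1 : -256 ≤ byte) (h2 : byte ≤ 255) :
    crcByteB (x : Int) byte = ((nibN (nibN x (hiN byte)) (loN byte) : Nat) : Int) := by
  show crcByteB (x : Int) byte
    = ((nibN (nibN x ((PySem.Int.band byte 255).toNat >>> 4))
        ((PySem.Int.band byte 255).toNat &&& 15) : Nat) : Int)
  rw [nib2]
  unfold crcByteB
  rw [show List.range 8 = [0,1,2,3,4,5,6,7] from rfl]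
  simp only [List.foldl]
  rw [stepB byte h1 h2 _ 0 (by norm_num), stepB byte h1 h2 _ 1 (by norm_num),
    stepB byte h1 h2 _ 2 (by norm_num), stepB byte h1 h2 _ 3 (by norm_num),
    stepB byte h1 h2 _ 4 (by norm_num), stepB byte h1 h2 _ 5 (by norm_num),
    stepB byte h1 h2 _ 6 (by norm_num), stepB byte h1 h2 _ 7 (by norm_num)]
  norm_num

theorem loopB (data : List Int) : (∀ b ∈ data, -256 ≤ b ∧ b ≤ 255) →
    ∀ cN : Nat, crcHalfLoopB data (cN : Int) = ((gLoop data cN : Nat) : Int) := by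
  induction data with
  | nil => exact fun _ cN => rfl
  | cons byte rest ih =>
    intro hpre cN
    have hb := hpre byte List.mem_cons_self
    have hrest : ∀ x ∈ rest, -256 ≤ x ∧ x ≤ 255 :=
      fun x hx => hpre x (List.mem_cons_of_mem _ hx)
    show crcHalfLoopB rest (crcByteB (cN : Int) byte) = _
    rw [byteB cN byte hb.1 hb.2, ih hrest]
    rfl

theorem finExt (a g : Nat) (h : a &&& 65535 = g) :
    PySem.Int.band ((a : Nat) : Int) 255 = PySem.Int.band ((g : Nat) : Int) 255 ∧
    PySem.Int.band (((a : Nat) : Int) >>> (8 : Nat)) 255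
      = PySem.Int.band (((g : Nat) : Int) >>> (8 : Nat)) 255 := by
  constructor
  · rw [show (255:Int) = ((255:Nat):Int) from rfl, PySem.Int.band_natCast, PySem.Int.band_natCast]
    norm_cast
    rw [← h, Nat.and_assoc, show (65535:Nat) &&& 255 = 255 by decide]
  · rw [← Int.natCast_shiftRight, ← Int.natCast_shiftRight,
      show (255:Int) = ((255:Nat):Int) from rfl, PySem.Int.band_natCast, PySem.Int.band_natCast]
    norm_cast
    rw [← h, Nat.shiftRight_and_distrib, show (65535:Nat) >>> 8 = 255 from rfl, Nat.and_assoc,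
      show (255:Nat) &&& 255 = 255 by decide]

-- ===== VERDICT (by name: the statement is the Claim_ definition above) =====
theorem crc_half_spec : Claim_equal_crc_half := by
  intro data _ hpre
  unfold Spec_crc_half
  obtain ⟨rN, hA, hm⟩ := loopA data hpre 0
  have hB := loopB data hpre 0
  simp only [Nat.cast_zero] at hA hB
  have hg : rN &&& 65535 = gLoop data 0 := by rw [hm]; rfl
  obtain ⟨hL, hH⟩ := finExt rN (gLoop data 0) hg
  unfold crc_half crc_half_alt
  rw [hA, hB]
  show (let crcLow := PySem.Int.band ((rN : Nat) : Int) 255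
        let crcHigh := PySem.Int.band (((rN : Nat) : Int) >>> (8 : Nat)) 255
        let crcLow := if crcLow = 40 ∨ crcLow = 13 ∨ crcLow = 10 then crcLow + 1 else crcLow
        let crcHigh := if crcHigh = 40 ∨ crcHigh = 13 ∨ crcHigh = 10 then crcHigh + 1 else crcHigh
        ((crcHigh, crcLow) : Int × Int)) = _
  rw [hL, hH]
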